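-- pv_equiv track=rewrite | github.com/litbrother/my_some_code | python_basics/cow.py | num_of_cow
-- ===== SOURCE A (Python) =====
-- def num_of_cow(n):
--     if n==1:
--         return 2
--     if n==2:
--         return 3
--     if n==3:
--         return 4
--     if n==4:
--         return 6
--     return num_of_cow(n - 3) + num_of_cow(n - 1)
-- ===== SOURCE B (Python) =====
-- def num_of_cow(n):
--     if n <= 3:
--         return n + 1
--     a, b, c = 2, 3, 4
--     for _ in range(4, n + 1):
--         a, b, c = b, c, a + c
--     return c
-- ===== Notes on version B (the rewrite author's own statement) =====
-- stated objective: faster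
-- what changed: Replaced the exponential branching recursion f(n)=f(n-3)+f(n-1) by an iterative loop carrying the last three values (linear dynamic programming).
import Mathlib
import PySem

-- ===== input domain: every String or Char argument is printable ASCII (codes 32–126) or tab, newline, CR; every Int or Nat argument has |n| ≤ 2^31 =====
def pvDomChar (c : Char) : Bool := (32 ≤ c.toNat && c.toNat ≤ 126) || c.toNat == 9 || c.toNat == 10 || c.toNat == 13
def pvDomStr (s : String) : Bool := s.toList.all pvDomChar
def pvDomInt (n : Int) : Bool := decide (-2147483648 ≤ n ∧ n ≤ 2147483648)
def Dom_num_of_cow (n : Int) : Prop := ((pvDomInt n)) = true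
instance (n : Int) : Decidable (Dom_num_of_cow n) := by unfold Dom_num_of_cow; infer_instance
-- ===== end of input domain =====

-- B replaces A's exponential branching recursion by an iterative three-value loop (linear DP); intended as faster (A times out already at small n in a timing run).


-- ===== PORT A =====
-- A's recursion, on the Nat measure of n (for n ≤ 0 Python recurses forever — excluded by Pre_;
-- the `| 0 => 0` branch is unreachable on Pre_).
def cowRecA : Nat → Int
  | 0 => 0
  | 1 => 2
  | 2 => 3
  | 3 => 4
  | 4 => 6
  | (m + 5) => cowRecA (m + 2) + cowRecA (m + 4)

def num_of_cow (n : Int) : Int := cowRecA n.toNat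

-- ===== PORT B =====
def cowStep (s : Int × Int × Int) : Int × Int × Int := (s.2.1, s.2.2, s.1 + s.2.2)

def num_of_cow_alt (n : Int) : Int :=
  if n ≤ 3 then n + 1
  else (((PySem.List.pyRange 4 (n + 1) 1).foldl (fun s _ => cowStep s) (2, 3, 4)).2.2)

-- ===== PRECONDITION & SPEC =====
-- Pre_ excludes n ≤ 0, on which Python's A recurses without a base case (RecursionError).
def Pre_num_of_cow (n : Int) : Prop := 1 ≤ n
instance (n : Int) : Decidable (Pre_num_of_cow n) := by unfold Pre_num_of_cow; infer_instance
def pvWitness_num_of_cow : Int := 7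

def Spec_num_of_cow (n : Int) (out : Int) : Prop := out = num_of_cow_alt n
instance (n : Int) (out : Int) : Decidable (Spec_num_of_cow n out) := by unfold Spec_num_of_cow; infer_instance

-- ===== CLAIM (what is proved, stated in full; the proofs are below) =====
def Claim_equal_num_of_cow : Prop := ∀ (n : Int), Dom_num_of_cow n → Pre_num_of_cow n → Spec_num_of_cow n (num_of_cow n)

-- ===== LEMMAS AND PROOFS =====

-- the recurrence in the shape the loop invariant needs
theorem cowRecA_rec (k : Nat) : cowRecA (k + 4) = cowRecA (k + 1) + cowRecA (k + 3) := by
  cases k with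
  | zero => decide
  | succ m => rfl

-- a fold that ignores the elements is an iteration of the step, length many times
theorem foldl_const_iterate (l : List Int) (s : Int × Int × Int) :
    l.foldl (fun s _ => cowStep s) s = cowStep^[l.length] s := by
  induction l generalizing s with
  | nil => rfl
  | cons a t ih => simp [List.foldl, ih, Function.iterate_succ_apply]

-- loop invariant: after k iterations the state is (f(k+1), f(k+2), f(k+3))
theorem iterate_cowStep (k : Nat) :
    cowStep^[k] ((2 : Int), (3 : Int), (4 : Int)) = (cowRecA (k + 1), cowRecA (k + 2), cowRecA (k + 3)) := by
  induction k with
  | zero => decide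
  | succ m ih =>
      rw [Function.iterate_succ_apply', ih]
      have h := cowRecA_rec m
      simp only [cowStep]
      exact Prod.ext rfl (Prod.ext rfl (by rw [show m + 1 + 3 = m + 4 from rfl, h]))

theorem alt_eq_cowRecA (m : Nat) (h : 1 ≤ m) : num_of_cow_alt (m : Int) = cowRecA m := by
  unfold num_of_cow_alt
  by_cases h3 : (m : Int) ≤ 3
  · have : m = 1 ∨ m = 2 ∨ m = 3 := by omega
    rcases this with h | h | h <;> subst h <;> decide
  · rw [if_neg h3, foldl_const_iterate, PySem.List.length_pyRange_one]
    have hm : ((m : Int) + 1 - 4).toNat = m - 3 := by omega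
    rw [hm, iterate_cowStep]
    have : m - 3 + 3 = m := by omega
    rw [this]

-- ===== VERDICT (by name: the statement is the Claim_ definition above) =====
theorem num_of_cow_spec : Claim_equal_num_of_cow := by
  intro n _ hpre
  unfold Pre_num_of_cow at hpre
  unfold Spec_num_of_cow num_of_cow
  rw [show n = ((n.toNat : Nat) : Int) by omega, Int.toNat_natCast]
  exact (alt_eq_cowRecA n.toNat (by omega)).symm
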